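-- pv_equiv track=rewrite | github.com/MrGbro/algorithm-daily-py | june/chart0610.py | patternMatching
-- ===== SOURCE A (Python) =====
-- from collections import Counter
--
-- def patternMatching(pattern: str, value: str) -> bool:
--     def check(la:int,lb:int)->bool:
--         i =0
--         a,b = "",""
--         for c in pattern:
--             if c == "a":
--                 if a and value[i:i+la] != a:
--                     return False
--                 a = value[i:i+la]
--                 i += la
--             else:
--                 if b and value[i:i+lb] !=b:
--                     return False
--                 b = value[i:i+lb]
--                 i+=lb
--         return a!=b
--     n = len(value)
--     cnt = Counter(pattern)
--     if cnt["a"] == 0: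
--         return n % cnt["b"] == 0 and value[:n // cnt["b"]]*cnt["b"] == value
--     if cnt["b"] == 0:
--         return n % cnt["a"] == 0 and value[:n // cnt["a"]] * cnt["a"] == value
--     for la in range(n+1):
--         if la * cnt["a"] > n:
--             break
--         lb,mod = divmod(n-la*cnt["a"],cnt["b"])
--         if mod == 0 and check(la,lb):
--             return True
--     return False
-- ===== SOURCE B (Python) =====
-- def patternMatching(pattern: str, value: str) -> bool:
--     n = len(value)
--     na = pattern.count("a")
--     nb = pattern.count("b")
--     if na == 0:
--         return n % nb == 0 and value[:n // nb] * nb == value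
--     if nb == 0:
--         return n % na == 0 and value[:n // na] * na == value
--     # period of the congruence la*na = n (mod nb): t = nb // gcd(na, nb)
--     x, y = na, nb
--     while y:
--         x, y = y, x % y
--     t = nb // x
--     # first solution in one period, if any; all solutions are la0, la0+t, la0+2t, ...
--     la0 = next((r for r in range(t) if (n - r * na) % nb == 0), None)
--     if la0 is None:
--         return False
--     ia = pattern.index("a")                                    # offset factor of first 'a'
--     ib = next(i for i, c in enumerate(pattern) if c != "a")    # offset factor of first non-'a'
--     for la in range(la0, n // na + 1, t):
--         lb = (n - la * na) // nb
--         a = value[ia * lb: ia * lb + la]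
--         b = value[ib * la: ib * la + lb]
--         if a != b and "".join(a if c == "a" else b for c in pattern) == value:
--             return True
--     return False
-- ===== Notes on version B (the rewrite author's own statement) =====
-- stated objective: faster
-- what changed: A scans every candidate length la from 0 to n, filtering each by a divisibility test and verifying with a stateful incremental scan; …
import Mathlib
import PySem

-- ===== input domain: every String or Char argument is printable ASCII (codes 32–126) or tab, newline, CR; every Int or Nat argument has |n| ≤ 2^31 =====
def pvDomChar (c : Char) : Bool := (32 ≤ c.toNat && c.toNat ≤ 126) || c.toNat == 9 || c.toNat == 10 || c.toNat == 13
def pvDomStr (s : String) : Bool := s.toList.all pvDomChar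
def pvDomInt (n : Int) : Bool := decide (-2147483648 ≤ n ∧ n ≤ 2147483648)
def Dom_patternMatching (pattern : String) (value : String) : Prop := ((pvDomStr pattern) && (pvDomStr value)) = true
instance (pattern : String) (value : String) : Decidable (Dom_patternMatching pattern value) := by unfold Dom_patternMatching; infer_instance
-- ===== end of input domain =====

-- B replaces A's brute-force scan over all candidate lengths la in [0, n] (each filtered by a
-- divisibility test and verified by a stateful incremental scan) with a number-theoretic
-- parametrization: the admissible la are exactly the solutions of the linear congruence
-- la*count_a ≡ n (mod count_b), so B computes the period t = count_b // gcd(count_a, count_b),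
-- finds the first solution la0 inside one period (none → False), and steps through only
-- la0, la0+t, la0+2t, …, verifying each candidate by slicing a and b directly out of value
-- and comparing the rebuilt expansion of the pattern against value in one go.

-- ===== PORT A =====
-- Python s * k (empty for k ≤ 0) — exact
def pyMulStr (xs : List Char) (k : Int) : List Char := (List.replicate k.toNat xs).flatten

-- the inner closure check(la, lb): state (i, a, b), iterating over pattern
def checkA (v : List Char) (la lb : Int) : List Char → Int → List Char → List Char → Bool
  | [], _, a, b => decide (a ≠ b)
  | c :: cs, i, a, b =>
    if c = 'a' then
      if decide (a ≠ []) && decide (PySem.List.slice v (some i) (some (i + la)) ≠ a) then false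
      else checkA v la lb cs (i + la) (PySem.List.slice v (some i) (some (i + la))) b
    else
      if decide (b ≠ []) && decide (PySem.List.slice v (some i) (some (i + lb)) ≠ b) then false
      else checkA v la lb cs (i + lb) a (PySem.List.slice v (some i) (some (i + lb)))

-- for la in range(n+1): break on la*cnt_a > n; try divmod candidate
def loopA (v p : List Char) (n cntA cntB : Int) : List Int → Bool
  | [] => false
  | la :: rest =>
    if la * cntA > n then false
    else
      let lb := PySem.Int.floordiv (n - la * cntA) cntB
      let md := PySem.Int.mod (n - la * cntA) cntB
      if decide (md = 0) && checkA v la lb p 0 [] [] then true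
      else loopA v p n cntA cntB rest

def patternMatching (pattern : String) (value : String) : Bool :=
  let p := pattern.toList
  let v := value.toList
  let n : Int := (v.length : Int)
  let cntA : Int := (p.count 'a' : Int)
  let cntB : Int := (p.count 'b' : Int)
  if cntA = 0 then
    decide (PySem.Int.mod n cntB = 0) &&
      decide (pyMulStr (PySem.List.slice v none (some (PySem.Int.floordiv n cntB))) cntB = v)
  else if cntB = 0 then
    decide (PySem.Int.mod n cntA = 0) &&
      decide (pyMulStr (PySem.List.slice v none (some (PySem.Int.floordiv n cntA))) cntA = v)
  else loopA v p n cntA cntB (PySem.List.pyRange 0 (n + 1) 1)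

-- ===== PORT B =====
-- the hand-written Euclid loop 'while y: x, y = y, x % y' on the two (nonnegative) counts — exact
def pgcd : Nat → Nat → Nat
  | x, 0 => x
  | x, y+1 => pgcd (y+1) (x % (y+1))
termination_by x y => y
decreasing_by exact Nat.mod_lt _ (Nat.succ_pos _)

-- next((r for r in range(t) if (n - r*na) % nb == 0), None) — first match in the candidate list
def findLa0 (n na nb : Int) : List Int → Option Int
  | [] => none
  | r :: rs => if PySem.Int.mod (n - r * na) nb = 0 then some r else findLa0 n na nb rs

-- next(i for i, c in enumerate(pattern) if c != "a") — hand-ported generator search (exact: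
-- only reached when pattern contains a non-'a' character, so the StopIteration path is dead)
def firstNotA : List Char → Int
  | [] => 0
  | c :: cs => if c ≠ 'a' then 0 else 1 + firstNotA cs

-- "".join(a if c == "a" else b for c in pattern)
def expandB (a b : List Char) : List Char → List Char
  | [] => []
  | c :: cs => (if c = 'a' then a else b) ++ expandB a b cs

def loopB (v p : List Char) (n na nb ia ib : Int) : List Int → Bool
  | [] => false
  | la :: rest =>
    let lb := PySem.Int.floordiv (n - la * na) nb
    let a := PySem.List.slice v (some (ia * lb)) (some (ia * lb + la))
    let b := PySem.List.slice v (some (ib * la)) (some (ib * la + lb))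
    if decide (a ≠ b) && decide (expandB a b p = v) then true
    else loopB v p n na nb ia ib rest

def patternMatching_alt (pattern : String) (value : String) : Bool :=
  let p := pattern.toList
  let v := value.toList
  let n : Int := (v.length : Int)
  let na : Int := (p.count 'a' : Int)
  let nb : Int := (p.count 'b' : Int)
  if na = 0 then
    decide (PySem.Int.mod n nb = 0) &&
      decide (pyMulStr (PySem.List.slice v none (some (PySem.Int.floordiv n nb))) nb = v)
  else if nb = 0 then
    decide (PySem.Int.mod n na = 0) &&
      decide (pyMulStr (PySem.List.slice v none (some (PySem.Int.floordiv n na))) na = v)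
  else
    -- period of the congruence la*na ≡ n (mod nb)
    let t : Int := PySem.Int.floordiv nb ((pgcd (p.count 'a') (p.count 'b') : Nat) : Int)
    match findLa0 n na nb (PySem.List.pyRange 0 t 1) with
    | none => false
    | some la0 =>
      -- pattern.index("a"): present here since na > 0, so the default is dead
      let ia : Int := (((PySem.List.index? p 'a').getD 0 : Nat) : Int)
      let ib : Int := firstNotA p
      loopB v p n na nb ia ib (PySem.List.pyRange la0 (PySem.Int.floordiv n na + 1) t)

-- ===== PRECONDITION & SPEC =====
-- Pre_ excludes only patterns containing neither 'a' nor 'b', on which A (and B alike)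
-- raises ZeroDivisionError (n % cnt["b"] with cnt["b"] == 0).
def Pre_patternMatching (pattern : String) (value : String) : Prop :=
  'a' ∈ pattern.toList ∨ 'b' ∈ pattern.toList
instance (pattern : String) (value : String) : Decidable (Pre_patternMatching pattern value) := by
  unfold Pre_patternMatching; infer_instance

def pvWitness_patternMatching : String × String := ("ab", "xy")

def Spec_patternMatching (pattern : String) (value : String) (out : Bool) : Prop :=
  out = patternMatching_alt pattern value
instance (pattern : String) (value : String) (out : Bool) : Decidable (Spec_patternMatching pattern value out) := by
  unfold Spec_patternMatching; infer_instance

-- ===== CLAIM (what is proved, stated in full; the proofs are below) =====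
def Claim_equal_patternMatching : Prop := ∀ (pattern : String) (value : String), Dom_patternMatching pattern value → Pre_patternMatching pattern value → Spec_patternMatching pattern value (patternMatching pattern value)

-- ===== LEMMAS AND PROOFS =====


/- Nat-side mirror of A's inner check and B's reconstruction test -/

def sl (v : List Char) (i l : Nat) : List Char := (v.drop i).take l

def chLen (LA LB : Nat) (c : Char) : Nat := if c = 'a' then LA else LB

def checkN (v : List Char) (LA LB : Nat) : List Char → Nat → List Char → List Char → Bool
  | [], _, a, b => decide (a ≠ b)
  | c :: cs, i, a, b =>
    if c = 'a' then
      if decide (a ≠ []) && decide (sl v i LA ≠ a) then false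
      else checkN v LA LB cs (i + LA) (sl v i LA) b
    else
      if decide (b ≠ []) && decide (sl v i LB ≠ b) then false
      else checkN v LA LB cs (i + LB) a (sl v i LB)

def allOcc (v : List Char) (LA LB : Nat) : List Char → Nat → List Char → List Char → Prop
  | [], _, _, _ => True
  | c :: cs, i, A, B =>
    sl v i (chLen LA LB c) = (if c = 'a' then A else B) ∧
      allOcc v LA LB cs (i + chLen LA LB c) A B

def refA (v : List Char) (LA LB : Nat) : List Char → Nat → List Char
  | [], _ => []
  | c :: cs, i => if c = 'a' then sl v i LA else refA v LA LB cs (i + LB)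

def refB (v : List Char) (LA LB : Nat) : List Char → Nat → List Char
  | [], _ => []
  | c :: cs, i => if c = 'a' then refB v LA LB cs (i + LA) else sl v i LB

def posA (LB : Nat) : List Char → Nat → Option Nat
  | [], _ => none
  | c :: cs, i => if c = 'a' then some i else posA LB cs (i + LB)

def posB (LA : Nat) : List Char → Nat → Option Nat
  | [], _ => none
  | c :: cs, i => if c = 'a' then posB LA cs (i + LA) else some i

def eA (v : List Char) (LA LB : Nat) (cs : List Char) (i : Nat) (a : List Char) : List Char :=
  if a = [] then refA v LA LB cs i else a

def eB (v : List Char) (LA LB : Nat) (cs : List Char) (i : Nat) (b : List Char) : List Char :=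
  if b = [] then refB v LA LB cs i else b

def advN (LA LB : Nat) (cs : List Char) : Nat := (cs.map (chLen LA LB)).sum

theorem sl_empty_iff (v : List Char) (i l : Nat) : sl v i l = [] ↔ l = 0 ∨ v.length ≤ i := by
  simp [sl, List.take_eq_nil_iff, List.drop_eq_nil_iff]

theorem posA_ge (LB : Nat) (cs : List Char) (i j : Nat) (h : posA LB cs i = some j) : i ≤ j := by
  induction cs generalizing i with
  | nil => simp [posA] at h
  | cons c cs ih =>
    simp only [posA] at h
    split at h
    · simp at h; omega
    · exact le_trans (by omega) (ih _ h)

theorem posB_ge (LA : Nat) (cs : List Char) (i j : Nat) (h : posB LA cs i = some j) : i ≤ j := by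
  induction cs generalizing i with
  | nil => simp [posB] at h
  | cons c cs ih =>
    simp only [posB] at h
    split at h
    · exact le_trans (by omega) (ih _ h)
    · simp at h; omega

theorem refA_of_posA (v : List Char) (LA LB : Nat) (cs : List Char) (i j : Nat)
    (h : posA LB cs i = some j) : refA v LA LB cs i = sl v j LA := by
  induction cs generalizing i with
  | nil => simp [posA] at h
  | cons c cs ih =>
    simp only [posA] at h; simp only [refA]
    split <;> rename_i hc
    · rw [if_pos hc] at h; simp at h; rw [h]
    · rw [if_neg hc] at h; exact ih _ h

theorem refA_of_posA_none (v : List Char) (LA LB : Nat) (cs : List Char) (i : Nat)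
    (h : posA LB cs i = none) : refA v LA LB cs i = [] := by
  induction cs generalizing i with
  | nil => simp [refA]
  | cons c cs ih =>
    simp only [posA] at h; simp only [refA]
    split <;> rename_i hc
    · rw [if_pos hc] at h; simp at h
    · rw [if_neg hc] at h; exact ih _ h

theorem refB_of_posB (v : List Char) (LA LB : Nat) (cs : List Char) (i j : Nat)
    (h : posB LA cs i = some j) : refB v LA LB cs i = sl v j LB := by
  induction cs generalizing i with
  | nil => simp [posB] at h
  | cons c cs ih =>
    simp only [posB] at h; simp only [refB]
    split <;> rename_i hc
    · rw [if_pos hc] at h; exact ih _ h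
    · rw [if_neg hc] at h; simp at h; rw [h]

theorem refB_of_posB_none (v : List Char) (LA LB : Nat) (cs : List Char) (i : Nat)
    (h : posB LA cs i = none) : refB v LA LB cs i = [] := by
  induction cs generalizing i with
  | nil => simp [refB]
  | cons c cs ih =>
    simp only [posB] at h; simp only [refB]
    split <;> rename_i hc
    · rw [if_pos hc] at h; exact ih _ h
    · rw [if_neg hc] at h; simp at h

theorem refA_empty (v : List Char) (LA LB : Nat) (cs : List Char) (i i' : Nat)
    (h : sl v i LA = []) (hle : i ≤ i') : refA v LA LB cs i' = [] := by
  rcases hpos : posA LB cs i' with _ | j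
  · exact refA_of_posA_none v LA LB cs i' hpos
  · rw [refA_of_posA v LA LB cs i' j hpos]
    have hj := posA_ge LB cs i' j hpos
    rw [sl_empty_iff] at h ⊢; omega

theorem refB_empty (v : List Char) (LA LB : Nat) (cs : List Char) (i i' : Nat)
    (h : sl v i LB = []) (hle : i ≤ i') : refB v LA LB cs i' = [] := by
  rcases hpos : posB LA cs i' with _ | j
  · exact refB_of_posB_none v LA LB cs i' hpos
  · rw [refB_of_posB v LA LB cs i' j hpos]
    have hj := posB_ge LA cs i' j hpos
    rw [sl_empty_iff] at h ⊢; omega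

/- L1: A's stateful check succeeds iff every occurrence slice equals the effective
   reference slice and the two references differ. -/
theorem checkN_iff (v : List Char) (LA LB : Nat) (cs : List Char) (i : Nat) (a b : List Char) :
    checkN v LA LB cs i a b = true ↔
      (allOcc v LA LB cs i (eA v LA LB cs i a) (eB v LA LB cs i b) ∧
        eA v LA LB cs i a ≠ eB v LA LB cs i b) := by
  induction cs generalizing i a b with
  | nil =>
    simp only [checkN, allOcc, eA, eB, refA, refB]
    by_cases ha : a = [] <;> by_cases hb : b = [] <;> simp [ha, hb]
  | cons c cs ih =>
    by_cases hc : c = 'a'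
    · subst hc
      have heB : ∀ b, eB v LA LB ('a'::cs) i b = eB v LA LB cs (i+LA) b := by
        intro b; simp [eB, refB]
      by_cases ha : a = []
      · subst ha
        have hstep : checkN v LA LB ('a'::cs) i [] b = checkN v LA LB cs (i+LA) (sl v i LA) b := by
          simp [checkN]
        rw [hstep, ih]
        by_cases hsl : sl v i LA = []
        · have h1 : eA v LA LB cs (i+LA) (sl v i LA) = [] := by
            simp [eA, hsl, refA_empty v LA LB cs i (i+LA) hsl (Nat.le_add_right _ _)]
          have h2 : eA v LA LB ('a'::cs) i [] = [] := by
            simp [eA, refA, hsl]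
          rw [h1, h2, heB]
          simp [allOcc, chLen, hsl]
        · have h1 : eA v LA LB cs (i+LA) (sl v i LA) = sl v i LA := by simp [eA, hsl]
          have h2 : eA v LA LB ('a'::cs) i [] = sl v i LA := by simp [eA, refA]
          rw [h1, h2, heB]
          simp [allOcc, chLen]
      · have h2 : eA v LA LB ('a'::cs) i a = a := by simp [eA, ha]
        by_cases hm : sl v i LA = a
        · have hstep : checkN v LA LB ('a'::cs) i a b = checkN v LA LB cs (i+LA) (sl v i LA) b := by
            simp [checkN, hm]
          rw [hstep, hm, ih]
          have h1 : eA v LA LB cs (i+LA) a = a := by simp [eA, ha]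
          rw [h1, h2, heB]
          simp [allOcc, chLen, hm]
        · have hstep : checkN v LA LB ('a'::cs) i a b = false := by
            simp [checkN, ha, hm]
          rw [hstep, h2, heB]
          simp [allOcc, chLen, hm]
    · have heA : ∀ a, eA v LA LB (c::cs) i a = eA v LA LB cs (i+LB) a := by
        intro a; simp [eA, refA, hc]
      by_cases hb : b = []
      · subst hb
        have hstep : checkN v LA LB (c::cs) i a [] = checkN v LA LB cs (i+LB) a (sl v i LB) := by
          simp [checkN, hc]
        rw [hstep, ih]
        by_cases hsl : sl v i LB = []
        · have h1 : eB v LA LB cs (i+LB) (sl v i LB) = [] := by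
            simp [eB, hsl, refB_empty v LA LB cs i (i+LB) hsl (Nat.le_add_right _ _)]
          have h2 : eB v LA LB (c::cs) i [] = [] := by
            simp [eB, refB, hc, hsl]
          rw [h1, h2, heA]
          simp [allOcc, chLen, hc, hsl]
        · have h1 : eB v LA LB cs (i+LB) (sl v i LB) = sl v i LB := by simp [eB, hsl]
          have h2 : eB v LA LB (c::cs) i [] = sl v i LB := by simp [eB, refB, hc]
          rw [h1, h2, heA]
          simp [allOcc, chLen, hc]
      · have h2 : eB v LA LB (c::cs) i b = b := by simp [eB, hb]
        by_cases hm : sl v i LB = b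
        · have hstep : checkN v LA LB (c::cs) i a b = checkN v LA LB cs (i+LB) a (sl v i LB) := by
            simp [checkN, hc, hm]
          rw [hstep, hm, ih]
          have h1 : eB v LA LB cs (i+LB) b = b := by simp [eB, hb]
          rw [h1, h2, heA]
          simp [allOcc, chLen, hc, hm]
        · have hstep : checkN v LA LB (c::cs) i a b = false := by
            simp [checkN, hc, hb, hm]
          rw [hstep, h2, heA]
          simp [allOcc, chLen, hc, hm]

/- L2→ -/
theorem sl_add (v : List Char) (i l m : Nat) : sl v i (l + m) = sl v i l ++ sl v (i + l) m := by
  simp [sl, List.take_add, List.drop_drop]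

theorem expand_of_allOcc (v : List Char) (LA LB : Nat) (cs : List Char) (i : Nat)
    (A B : List Char) (h : allOcc v LA LB cs i A B) :
    expandB A B cs = sl v i (advN LA LB cs) := by
  induction cs generalizing i with
  | nil => simp [expandB, advN, sl]
  | cons c cs ih =>
    obtain ⟨h1, h2⟩ := h
    have h3 := ih (i + chLen LA LB c) h2
    simp only [expandB, advN, List.map_cons, List.sum_cons]
    rw [sl_add, ← h1, h3]
    rfl

/- L2← -/
theorem allOcc_of_expand (v : List Char) (LA LB : Nat) (cs : List Char) (i : Nat)
    (A B : List Char) (hA : A.length ≤ LA) (hB : B.length ≤ LB)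
    (hIA : ∀ j, posA LB cs i = some j → A.length < LA → v.length ≤ j + A.length)
    (hIB : ∀ j, posB LA cs i = some j → B.length < LB → v.length ≤ j + B.length)
    (h : expandB A B cs = v.drop i) : allOcc v LA LB cs i A B := by
  induction cs generalizing i with
  | nil => simp [allOcc]
  | cons c cs ih =>
    by_cases hc : c = 'a'
    · subst hc
      simp only [expandB] at h
      rw [if_pos trivial] at h
      rcases Nat.lt_or_ge A.length LA with hlt | hge
      · have hN : v.length ≤ i + A.length := hIA i (by simp [posA]) hlt
        have hlen : A.length + (expandB A B cs).length = v.length - i := by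
          have := congrArg List.length h; simpa using this
        have hX : expandB A B cs = [] :=
          List.eq_nil_of_length_eq_zero (by omega)
        rw [hX, List.append_nil] at h
        refine ⟨?_, ih (i + chLen LA LB 'a') ?_ ?_ ?_⟩
        · show sl v i (chLen LA LB 'a') = if 'a' = 'a' then A else B
          simp only [chLen, sl, if_true]
          rw [← h, List.take_of_length_le (Nat.le_of_lt hlt)]
        · intro j hj hsh
          have h1 := posA_ge LB cs (i + LA) j (by simpa [chLen] using hj)
          omega
        · intro j hj hsh
          refine hIB j ?_ hsh
          simpa [posB, chLen] using hj
        · rw [hX, eq_comm, List.drop_eq_nil_iff]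
          simp [chLen]; omega
      · have hlen : A.length = LA := le_antisymm hA hge
        refine ⟨?_, ih (i + chLen LA LB 'a') ?_ ?_ ?_⟩
        · show sl v i (chLen LA LB 'a') = if 'a' = 'a' then A else B
          simp only [chLen, sl, if_true]
          rw [← h, List.take_left' hlen]
        · intro j hj hsh; omega
        · intro j hj hsh
          refine hIB j ?_ hsh
          simpa [posB, chLen] using hj
        · have h2 := congrArg (List.drop LA) h
          rw [List.drop_left' hlen] at h2
          rw [h2, List.drop_drop]
          congr 1
    · simp only [expandB] at h
      rw [if_neg hc] at h
      rcases Nat.lt_or_ge B.length LB with hlt | hge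
      · have hN : v.length ≤ i + B.length := hIB i (by simp [posB, hc]) hlt
        have hlen : B.length + (expandB A B cs).length = v.length - i := by
          have := congrArg List.length h; simpa using this
        have hX : expandB A B cs = [] :=
          List.eq_nil_of_length_eq_zero (by omega)
        rw [hX, List.append_nil] at h
        refine ⟨?_, ih (i + chLen LA LB c) ?_ ?_ ?_⟩
        · show sl v i (chLen LA LB c) = if c = 'a' then A else B
          simp only [chLen, if_neg hc, sl]
          rw [← h, List.take_of_length_le (Nat.le_of_lt hlt)]
        · intro j hj hsh
          refine hIA j ?_ hsh
          simpa [posA, hc, chLen] using hj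
        · intro j hj hsh
          have h1 := posB_ge LA cs (i + LB) j (by simpa [chLen, hc] using hj)
          omega
        · rw [hX, eq_comm, List.drop_eq_nil_iff]
          simp [chLen, hc]; omega
      · have hlen : B.length = LB := le_antisymm hB hge
        refine ⟨?_, ih (i + chLen LA LB c) ?_ ?_ ?_⟩
        · show sl v i (chLen LA LB c) = if c = 'a' then A else B
          simp only [chLen, if_neg hc, sl]
          rw [← h, List.take_left' hlen]
        · intro j hj hsh
          refine hIA j ?_ hsh
          simpa [posA, hc, chLen] using hj
        · intro j hj hsh; omega
        · have h2 := congrArg (List.drop LB) h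
          rw [List.drop_left' hlen] at h2
          rw [h2, List.drop_drop]
          congr 1
          simp [chLen, hc]

theorem sl_length (v : List Char) (i l : Nat) : (sl v i l).length = min l (v.length - i) := by
  simp [sl]

theorem refA_len_le (v : List Char) (LA LB : Nat) (cs : List Char) (i : Nat) :
    (refA v LA LB cs i).length ≤ LA := by
  induction cs generalizing i with
  | nil => simp [refA]
  | cons c cs ih =>
    simp only [refA]
    split
    · rw [sl_length]; omega
    · exact ih _

theorem refB_len_le (v : List Char) (LA LB : Nat) (cs : List Char) (i : Nat) :
    (refB v LA LB cs i).length ≤ LB := by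
  induction cs generalizing i with
  | nil => simp [refB]
  | cons c cs ih =>
    simp only [refB]
    split
    · exact ih _
    · rw [sl_length]; omega

/- the per-candidate core: A's check succeeds iff B's reconstruction test does -/
theorem core_eq (v p : List Char) (LA LB : Nat) (hadv : v.length ≤ advN LA LB p) :
    checkN v LA LB p 0 [] [] =
      (decide (refA v LA LB p 0 ≠ refB v LA LB p 0) &&
        decide (expandB (refA v LA LB p 0) (refB v LA LB p 0) p = v)) := by
  rw [Bool.eq_iff_iff]
  simp only [Bool.and_eq_true, decide_eq_true_eq]
  rw [checkN_iff]
  have heA : eA v LA LB p 0 [] = refA v LA LB p 0 := by simp [eA]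
  have heB : eB v LA LB p 0 [] = refB v LA LB p 0 := by simp [eB]
  rw [heA, heB]
  constructor
  · rintro ⟨hocc, hne⟩
    refine ⟨hne, ?_⟩
    rw [expand_of_allOcc v LA LB p 0 _ _ hocc]
    simp only [sl, List.drop_zero]
    exact List.take_of_length_le hadv
  · rintro ⟨hne, hexp⟩
    refine ⟨?_, hne⟩
    apply allOcc_of_expand v LA LB p 0 _ _ (refA_len_le v LA LB p 0) (refB_len_le v LA LB p 0)
    · intro j hj hsh
      rw [refA_of_posA v LA LB p 0 j hj] at hsh ⊢
      rw [sl_length] at hsh ⊢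
      omega
    · intro j hj hsh
      rw [refB_of_posB v LA LB p 0 j hj] at hsh ⊢
      rw [sl_length] at hsh ⊢
      omega
    · simpa using hexp

/- bridge: the Int-level port of check equals its Nat mirror -/
theorem checkA_eq_checkN (v : List Char) (LA LB : Nat) (cs : List Char) (i : Nat)
    (a b : List Char) :
    checkA v (LA : Int) (LB : Int) cs (i : Int) a b = checkN v LA LB cs i a b := by
  induction cs generalizing i a b with
  | nil => rfl
  | cons c cs ih =>
    simp only [checkA, checkN, PySem.List.slice_natCast_add]
    rw [show (i : Int) + (LA : Int) = ((i + LA : Nat) : Int) from by push_cast; ring,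
        show (i : Int) + (LB : Int) = ((i + LB : Nat) : Int) from by push_cast; ring]
    simp only [sl]
    by_cases hc : c = 'a'
    · simp only [if_pos hc]
      split <;> rename_i h1
      · split <;> rename_i h2
        · rfl
        · exfalso; simp at h1 h2; tauto
      · split <;> rename_i h2
        · exfalso; simp at h1 h2; tauto
        · exact ih (i + LA) _ b
    · simp only [if_neg hc]
      split <;> rename_i h1
      · split <;> rename_i h2
        · rfl
        · exfalso; simp at h1 h2; tauto
      · split <;> rename_i h2
        · exfalso; simp at h1 h2; tauto
        · exact ih (i + LB) a _

/- positions of the first 'a' / first non-'a' -/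
theorem posA_first (LB : Nat) (p : List Char) (i : Nat) (h : 'a' ∈ p) :
    posA LB p i = some (i + LB * ((PySem.List.index? p 'a').getD 0)) := by
  induction p generalizing i with
  | nil => simp at h
  | cons c cs ih =>
    by_cases hc : c = 'a'
    · subst hc
      rw [PySem.List.index?_cons_self]
      simp [posA]
    · have hmem : 'a' ∈ cs := by
        rcases List.mem_cons.mp h with h1 | h1
        · exact absurd h1.symm hc
        · exact h1
      rw [PySem.List.index?_cons_of_ne cs hc]
      rcases Option.isSome_iff_exists.mp ((PySem.List.index?_isSome_iff cs 'a').mpr hmem) with ⟨k, hk⟩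
      simp only [posA, if_neg hc]
      rw [ih _ hmem, hk]
      simp
      ring

theorem posB_first (LA : Nat) (p : List Char) (i : Nat) (h : ∃ c ∈ p, c ≠ 'a') :
    ∃ IB : Nat, firstNotA p = (IB : Int) ∧ posB LA p i = some (i + LA * IB) := by
  induction p generalizing i with
  | nil => simp at h
  | cons c cs ih =>
    by_cases hc : c = 'a'
    · subst hc
      have hmem : ∃ c ∈ cs, c ≠ 'a' := by
        rcases h with ⟨d, hd, hdne⟩
        rcases List.mem_cons.mp hd with h1 | h1
        · exact absurd h1 hdne
        · exact ⟨d, h1, hdne⟩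
      rcases ih (i + LA) hmem with ⟨IB, h1, h2⟩
      refine ⟨IB + 1, ?_, ?_⟩
      · simp [firstNotA, h1]; ring
      · have hstep : posB LA ('a'::cs) i = posB LA cs (i + LA) := by simp [posB]
        rw [hstep, h2]
        congr 1
        ring
    · exact ⟨0, by simp [firstNotA, hc], by simp [posB, hc]⟩

theorem advN_count (LA LB : Nat) (cs : List Char) :
    advN LA LB cs = LA * cs.count 'a' + LB * (cs.countP (fun c => !(c == 'a'))) := by
  induction cs with
  | nil => simp [advN]
  | cons c cs ih =>
    simp only [advN, List.map_cons, List.sum_cons] at *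
    by_cases hc : c = 'a'
    · subst hc
      rw [List.count_cons_self, List.countP_cons_of_neg (by simp)]
      simp [chLen, ih]
      ring
    · rw [List.count_cons_of_ne hc, List.countP_cons_of_pos (by simp [hc])]
      simp [chLen, hc, ih]
      ring

theorem countB_le_countNotA (cs : List Char) :
    cs.count 'b' ≤ cs.countP (fun c => !(c == 'a')) := by
  rw [List.count_eq_countP]
  apply List.countP_mono_left
  intro c _ hc
  simp at hc
  simp [hc]

/- outer loops as List.any over the candidate list -/
def tC (v p : List Char) (n na nb ia ib : Int) (la : Int) : Bool :=
  decide (PySem.List.slice v (some (ia * PySem.Int.floordiv (n - la * na) nb))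
      (some (ia * PySem.Int.floordiv (n - la * na) nb + la)) ≠
    PySem.List.slice v (some (ib * la))
      (some (ib * la + PySem.Int.floordiv (n - la * na) nb))) &&
  decide (expandB
    (PySem.List.slice v (some (ia * PySem.Int.floordiv (n - la * na) nb))
      (some (ia * PySem.Int.floordiv (n - la * na) nb + la)))
    (PySem.List.slice v (some (ib * la))
      (some (ib * la + PySem.Int.floordiv (n - la * na) nb))) p = v)

def tA (v p : List Char) (n cA cB : Int) (la : Int) : Bool :=
  decide (PySem.Int.mod (n - la * cA) cB = 0) &&
    checkA v la (PySem.Int.floordiv (n - la * cA) cB) p 0 [] []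

def tB (v p : List Char) (n na nb ia ib : Int) (la : Int) : Bool :=
  decide (PySem.Int.mod (n - la * na) nb = 0) && tC v p n na nb ia ib la

theorem loopA_cons (v p : List Char) (n cA cB la : Int) (rest : List Int) :
    loopA v p n cA cB (la :: rest) =
      if la * cA > n then false
      else (tA v p n cA cB la || loopA v p n cA cB rest) := by
  by_cases hbrk : la * cA > n
  · simp [loopA, hbrk]
  · simp only [loopA, if_neg hbrk, tA]
    cases h : (decide (PySem.Int.mod (n - la * cA) cB = 0) &&
        checkA v la (PySem.Int.floordiv (n - la * cA) cB) p 0 [] [])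
    · simp
    · simp

theorem loopA_breakfree (v p : List Char) (n cA cB : Int) (xs ys : List Int)
    (hxs : ∀ la ∈ xs, ¬ la * cA > n) :
    loopA v p n cA cB (xs ++ ys) =
      (xs.any (tA v p n cA cB) || loopA v p n cA cB ys) := by
  induction xs with
  | nil => simp
  | cons la xs ih =>
    rw [List.cons_append, loopA_cons, if_neg (hxs la (List.mem_cons_self))]
    rw [ih (fun x hx => hxs x (List.mem_cons_of_mem _ hx))]
    simp [Bool.or_assoc]

theorem loopB_eq_any (v p : List Char) (n na nb ia ib : Int) (xs : List Int) :
    loopB v p n na nb ia ib xs = xs.any (tC v p n na nb ia ib) := by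
  induction xs with
  | nil => simp [loopB]
  | cons la xs ih =>
    simp only [loopB, List.any_cons, ← ih, tC]
    cases h : (decide (PySem.List.slice v (some (ia * PySem.Int.floordiv (n - la * na) nb))
          (some (ia * PySem.Int.floordiv (n - la * na) nb + la)) ≠
        PySem.List.slice v (some (ib * la))
          (some (ib * la + PySem.Int.floordiv (n - la * na) nb))) &&
      decide (expandB
        (PySem.List.slice v (some (ia * PySem.Int.floordiv (n - la * na) nb))
          (some (ia * PySem.Int.floordiv (n - la * na) nb + la)))
        (PySem.List.slice v (some (ib * la))
          (some (ib * la + PySem.Int.floordiv (n - la * na) nb))) p = v))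
    · simp
    · simp

theorem anyCongr {α : Type} (xs : List α) (f g : α → Bool)
    (h : ∀ x ∈ xs, f x = g x) : xs.any f = xs.any g := by
  induction xs with
  | nil => rfl
  | cons x xs ih =>
    simp only [List.any_cons, h x (List.mem_cons_self)]
    rw [ih (fun y hy => h y (List.mem_cons_of_mem _ hy))]

/- pointwise: the two per-candidate tests agree on every candidate the loops share -/
theorem tA_eq_tB (v p : List Char) (hpa : 'a' ∈ p) (hpb : 'b' ∈ p) (la : Int)
    (hla0 : 0 ≤ la) (hlaK : la ≤ ((v.length / p.count 'a' : Nat) : Int)) :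
    tA v p (v.length : Int) (p.count 'a' : Int) (p.count 'b' : Int) la =
      tB v p (v.length : Int) (p.count 'a' : Int) (p.count 'b' : Int)
        ((((PySem.List.index? p 'a').getD 0 : Nat)) : Int) (firstNotA p) la := by
  have hNApos : 0 < p.count 'a' := List.count_pos_iff.mpr hpa
  have hNBpos : 0 < p.count 'b' := List.count_pos_iff.mpr hpb
  obtain ⟨LAc, rfl⟩ : ∃ m : Nat, la = (m : Int) :=
    ⟨la.toNat, (Int.toNat_of_nonneg hla0).symm⟩
  have hLAK : LAc ≤ v.length / p.count 'a' := by exact_mod_cast hlaK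
  have hLAN : LAc * p.count 'a' ≤ v.length :=
    le_trans (Nat.mul_le_mul_right _ hLAK) (Nat.div_mul_le_self _ _)
  have hsub : (v.length : Int) - (LAc : Int) * (p.count 'a' : Int) =
      ((v.length - LAc * p.count 'a' : Nat) : Int) := by
    rw [Int.natCast_sub hLAN]; push_cast; ring
  have hmod : PySem.Int.mod ((v.length : Int) - (LAc : Int) * (p.count 'a' : Int)) (p.count 'b' : Int) =
      (((v.length - LAc * p.count 'a') % p.count 'b' : Nat) : Int) := by
    rw [hsub]; exact_mod_cast PySem.Int.mod_natCast _ _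
  have hdiv : PySem.Int.floordiv ((v.length : Int) - (LAc : Int) * (p.count 'a' : Int)) (p.count 'b' : Int) =
      (((v.length - LAc * p.count 'a') / p.count 'b' : Nat) : Int) := by
    rw [hsub]; exact_mod_cast PySem.Int.floordiv_natCast _ _
  unfold tA tB tC
  rw [hmod, hdiv]
  by_cases h0 : (v.length - LAc * p.count 'a') % p.count 'b' = 0
  · set LBc := (v.length - LAc * p.count 'a') / p.count 'b' with hLBc
    have hMeq : LBc * p.count 'b' = v.length - LAc * p.count 'a' :=
      Nat.div_mul_cancel (Nat.dvd_of_mod_eq_zero h0)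
    have hNsum : LAc * p.count 'a' + LBc * p.count 'b' = v.length := by omega
    have hadv : v.length ≤ advN LAc LBc p := by
      rw [advN_count]
      have h1 : LBc * p.count 'b' ≤ LBc * p.countP (fun c => !(c == 'a')) :=
        Nat.mul_le_mul_left _ (countB_le_countNotA p)
      omega
    -- A side to the Nat core
    rw [show (0 : Int) = ((0 : Nat) : Int) from rfl, checkA_eq_checkN, core_eq v p LAc LBc hadv]
    -- B side slices are the reference slices
    have hposA := posA_first LBc p 0 hpa
    have hrefA : refA v LAc LBc p 0 = sl v (LBc * ((PySem.List.index? p 'a').getD 0)) LAc := by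
      rw [refA_of_posA v LAc LBc p 0 _ hposA, Nat.zero_add]
    obtain ⟨IB, hIBdef, hposB⟩ := posB_first LAc p 0 ⟨'b', hpb, by decide⟩
    have hrefB : refB v LAc LBc p 0 = sl v (LAc * IB) LBc := by
      rw [refB_of_posB v LAc LBc p 0 _ hposB, Nat.zero_add]
    have hsliceA :
        PySem.List.slice v (some (((((PySem.List.index? p 'a').getD 0 : Nat)) : Int) * ((LBc : Nat) : Int)))
          (some (((((PySem.List.index? p 'a').getD 0 : Nat)) : Int) * ((LBc : Nat) : Int) + (LAc : Int))) =
        sl v (LBc * ((PySem.List.index? p 'a').getD 0)) LAc := by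
      rw [show ((((PySem.List.index? p 'a').getD 0 : Nat)) : Int) * ((LBc : Nat) : Int) =
            ((LBc * ((PySem.List.index? p 'a').getD 0) : Nat) : Int) from by push_cast; ring,
          PySem.List.slice_natCast_add]
      rfl
    have hsliceB :
        PySem.List.slice v (some (firstNotA p * (LAc : Int)))
          (some (firstNotA p * (LAc : Int) + ((LBc : Nat) : Int))) =
        sl v (LAc * IB) LBc := by
      rw [hIBdef,
          show ((IB : Int) * (LAc : Int)) = ((LAc * IB : Nat) : Int) from by push_cast; ring,
          PySem.List.slice_natCast_add]
      rfl
    rw [hsliceA, hsliceB, hrefA, hrefB]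
  · have hdec : (decide ((((v.length - LAc * p.count 'a') % p.count 'b' : Nat) : Int) = 0)) = false := by
      simp only [decide_eq_false_iff_not, Nat.cast_eq_zero]
      exact h0
    rw [hdec]
    simp

/- ===== the congruence / stride machinery behind B's candidate enumeration ===== -/

theorem pgcd_eq_gcd (x y : Nat) : pgcd x y = Nat.gcd x y := by
  induction x, y using pgcd.induct with
  | case1 x => rw [pgcd]; exact (Nat.gcd_zero_right x).symm
  | case2 x y ih =>
    rw [pgcd, ih, Nat.gcd_comm (y+1) (x % (y+1)), ← Nat.gcd_rec (y+1) x, Nat.gcd_comm]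

/- NB ∣ T * NA for T = NB / gcd NA NB -/
theorem dvd_T_mul (NA NB : Nat) (hNA : 0 < NA) :
    ((NB : Int)) ∣ ((NB / Nat.gcd NA NB : Nat) : Int) * (NA : Int) := by
  obtain ⟨u, hu⟩ := Nat.gcd_dvd_left NA NB
  obtain ⟨w, hw⟩ := Nat.gcd_dvd_right NA NB
  have hG : 0 < Nat.gcd NA NB := Nat.gcd_pos_of_pos_left _ hNA
  have hT : NB / Nat.gcd NA NB = w := by
    have h := Nat.mul_div_cancel_left w hG
    rwa [← hw] at h
  have hkey : w * NA = NB * u := by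
    apply Nat.eq_of_mul_eq_mul_left hG
    calc Nat.gcd NA NB * (w * NA) = (Nat.gcd NA NB * w) * NA := by ring
      _ = NB * NA := by rw [← hw]
      _ = NA * NB := by ring
      _ = (Nat.gcd NA NB * u) * NB := by rw [← hu]
      _ = Nat.gcd NA NB * (NB * u) := by ring
  refine ⟨(u : Int), ?_⟩
  rw [hT]
  exact_mod_cast congrArg (Nat.cast (R := Int)) hkey

/- uniqueness of the solution modulo T -/
theorem stride_dvd (n : Int) (NA NB : Nat) (hNA : 0 < NA) (la1 la2 : Int)
    (h1 : (NB : Int) ∣ (n - la1 * NA)) (h2 : (NB : Int) ∣ (n - la2 * NA)) :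
    ((NB / Nat.gcd NA NB : Nat) : Int) ∣ (la1 - la2) := by
  obtain ⟨u, hu⟩ := Nat.gcd_dvd_left NA NB
  obtain ⟨w, hw⟩ := Nat.gcd_dvd_right NA NB
  have hG : 0 < Nat.gcd NA NB := Nat.gcd_pos_of_pos_left _ hNA
  have hT : NB / Nat.gcd NA NB = w := by
    have h := Nat.mul_div_cancel_left w hG
    rwa [← hw] at h
  have hdvd : (NB : Int) ∣ (la1 - la2) * NA := by
    have := Int.dvd_sub h2 h1
    have heq : (n - la2 * NA) - (n - la1 * NA) = (la1 - la2) * (NA : Int) := by ring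
    rwa [heq] at this
  -- cancel the gcd factor
  obtain ⟨k, hk⟩ := hdvd
  have hGne : ((Nat.gcd NA NB : Nat) : Int) ≠ 0 := by exact_mod_cast hG.ne'
  have hkey : (la1 - la2) * (u : Int) = (w : Int) * k := by
    have hNAc : (NA : Int) = (Nat.gcd NA NB : Int) * u := by exact_mod_cast congrArg (Nat.cast (R := Int)) hu
    have hNBc : (NB : Int) = (Nat.gcd NA NB : Int) * w := by exact_mod_cast congrArg (Nat.cast (R := Int)) hw
    apply mul_left_cancel₀ hGne
    calc (Nat.gcd NA NB : Int) * ((la1 - la2) * u) = (la1 - la2) * ((Nat.gcd NA NB : Int) * u) := by ring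
      _ = (la1 - la2) * (NA : Int) := by rw [← hNAc]
      _ = (NB : Int) * k := hk
      _ = (Nat.gcd NA NB : Int) * (w * k) := by rw [hNBc]; ring
  have hwdvd : (w : Int) ∣ (la1 - la2) * (u : Int) := ⟨k, hkey⟩
  have hcop : Nat.Coprime u w := by
    have := Nat.coprime_div_gcd_div_gcd (m := NA) (n := NB) hG
    have hu' : NA / Nat.gcd NA NB = u := by
      have h := Nat.mul_div_cancel_left u hG
      rwa [← hu] at h
    have hw' : NB / Nat.gcd NA NB = w := by
      have h := Nat.mul_div_cancel_left w hG
      rwa [← hw] at h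
    rwa [hu', hw'] at this
  have hic : IsCoprime ((w : Int)) ((u : Int)) := by
    rw [Int.isCoprime_iff_gcd_eq_one]
    simpa [Int.gcd_natCast_natCast] using hcop.symm
  have := hic.dvd_of_dvd_mul_right hwdvd
  rwa [hT]

/- membership in the residue class transports the congruence -/
theorem dvd_of_stride (n : Int) (NA NB : Nat) (hNA : 0 < NA) (la1 la2 : Int)
    (h1 : (NB : Int) ∣ (n - la1 * NA))
    (hd : ((NB / Nat.gcd NA NB : Nat) : Int) ∣ (la2 - la1)) :
    (NB : Int) ∣ (n - la2 * NA) := by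
  obtain ⟨q, hq⟩ := hd
  have h2 : (NB : Int) ∣ (la2 - la1) * NA := by
    rw [hq, mul_assoc, mul_comm (q : Int) (NA : Int), ← mul_assoc]
    exact Dvd.dvd.mul_right (dvd_T_mul NA NB hNA) q
  have heq : n - la2 * NA = (n - la1 * NA) - (la2 - la1) * (NA : Int) := by ring
  rw [heq]
  exact Int.dvd_sub h1 h2

/- spec of the first-solution scan over range(s, t) -/
theorem findLa0_spec (n na nb t : Int) :
    ∀ (m : Nat) (s : Int), t - s ≤ (m : Int) →
      (findLa0 n na nb (PySem.List.pyRange s t 1) = none →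
        ∀ r, s ≤ r → r < t → PySem.Int.mod (n - r * na) nb ≠ 0) ∧
      (∀ la0, findLa0 n na nb (PySem.List.pyRange s t 1) = some la0 →
        s ≤ la0 ∧ la0 < t ∧ PySem.Int.mod (n - la0 * na) nb = 0 ∧
        ∀ r, s ≤ r → r < la0 → PySem.Int.mod (n - r * na) nb ≠ 0) := by
  intro m
  induction m with
  | zero =>
    intro s hm
    rw [PySem.List.pyRange_one_eq_nil (by omega)]
    refine ⟨fun _ r h1 h2 => by omega, fun la0 h => by simp [findLa0] at h⟩
  | succ m ih =>
    intro s hm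
    by_cases hst : s < t
    · rw [PySem.List.pyRange_one_cons hst]
      simp only [findLa0]
      by_cases hC : PySem.Int.mod (n - s * na) nb = 0
      · rw [if_pos hC]
        refine ⟨fun h => by simp at h, fun la0 h => ?_⟩
        have : la0 = s := by simpa using h.symm
        subst this
        exact ⟨le_refl _, hst, hC, fun r h1 h2 => by omega⟩
      · rw [if_neg hC]
        obtain ⟨hnone, hsome⟩ := ih (s + 1) (by omega)
        refine ⟨fun h r h1 h2 => ?_, fun la0 h => ?_⟩
        · rcases eq_or_lt_of_le h1 with rfl | h1'
          · exact hC
          · exact hnone h r (by omega) h2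
        · obtain ⟨ha, hb, hc, hd⟩ := hsome la0 h
          refine ⟨by omega, hb, hc, fun r h1 h2 => ?_⟩
          rcases eq_or_lt_of_le h1 with rfl | h1'
          · exact hC
          · exact hd r (by omega) h2
    · rw [PySem.List.pyRange_one_eq_nil (by omega)]
      refine ⟨fun _ r h1 h2 => by omega, fun la0 h => by simp [findLa0] at h⟩

/- the heart: A's filtered full-range ANY equals B's first-solution + stride ANY -/
theorem any_mod_stride (v p : List Char) (n : Int) (NA NB : Nat) (hNA : 0 < NA) (hNB : 0 < NB)
    (K ia ib : Int) :
    (PySem.List.pyRange 0 (K + 1) 1).any (tB v p n (NA : Int) (NB : Int) ia ib) =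
      (match findLa0 n (NA : Int) (NB : Int)
          (PySem.List.pyRange 0 ((NB / Nat.gcd NA NB : Nat) : Int) 1) with
        | none => false
        | some la0 =>
          (PySem.List.pyRange la0 (K + 1) ((NB / Nat.gcd NA NB : Nat) : Int)).any
            (tC v p n (NA : Int) (NB : Int) ia ib)) := by
  set T : Nat := NB / Nat.gcd NA NB with hTdef
  have hG : 0 < Nat.gcd NA NB := Nat.gcd_pos_of_pos_left _ hNA
  have hTpos : 0 < T := Nat.div_pos (Nat.le_of_dvd hNB (Nat.gcd_dvd_right NA NB)) hG
  have ht : (0 : Int) < (T : Int) := by exact_mod_cast hTpos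
  have hspec := findLa0_spec n (NA : Int) (NB : Int) (T : Int) T.succ 0 (by push_cast; omega)
  cases hfind : findLa0 n (NA : Int) (NB : Int) (PySem.List.pyRange 0 ((T : Nat) : Int) 1) with
  | none =>
    have hnone := hspec.1 hfind
    simp only
    rw [List.any_eq_false]
    intro la hla
    rw [PySem.List.mem_pyRange_one] at hla
    simp only [tB, Bool.and_eq_true, decide_eq_true_eq, not_and]
    intro hmod
    exfalso
    have hC : (NB : Int) ∣ (n - la * NA) := (PySem.Int.mod_eq_zero_iff_dvd _ _).mp hmod
    set r := la % (T : Int) with hrdef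
    have hr0 : 0 ≤ r := Int.emod_nonneg la (by omega)
    have hrT : r < (T : Int) := Int.emod_lt_of_pos la ht
    have hstride : ((T : Nat) : Int) ∣ (r - la) := by
      have hed : la % (T : Int) + (T : Int) * (la / (T : Int)) = la := Int.emod_add_mul_ediv la (T : Int)
      exact ⟨-(la / (T : Int)), by rw [mul_neg]; omega⟩
    have hCr : (NB : Int) ∣ (n - r * NA) := dvd_of_stride n NA NB hNA la r hC hstride
    exact hnone r hr0 hrT ((PySem.Int.mod_eq_zero_iff_dvd _ _).mpr hCr)
  | some la0 =>
    obtain ⟨hla00, hla0T, hla0C, hla0min⟩ := hspec.2 la0 hfind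
    have hC0 : (NB : Int) ∣ (n - la0 * NA) := (PySem.Int.mod_eq_zero_iff_dvd _ _).mp hla0C
    simp only
    rw [Bool.eq_iff_iff, List.any_eq_true, List.any_eq_true]
    constructor
    · rintro ⟨la, hmem, hpred⟩
      rw [PySem.List.mem_pyRange_one] at hmem
      simp only [tB, Bool.and_eq_true, decide_eq_true_eq] at hpred
      obtain ⟨hmod, htc⟩ := hpred
      have hC : (NB : Int) ∣ (n - la * NA) := (PySem.Int.mod_eq_zero_iff_dvd _ _).mp hmod
      have hge : la0 ≤ la := by
        by_contra hlt
        exact hla0min la (by omega) (by omega) hmod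
      refine ⟨la, ?_, htc⟩
      rw [PySem.List.mem_pyRange_iff_of_pos ht]
      exact ⟨hge, hmem.2, stride_dvd n NA NB hNA la la0 hC hC0⟩
    · rintro ⟨la, hmem, htc⟩
      rw [PySem.List.mem_pyRange_iff_of_pos ht] at hmem
      obtain ⟨hge, hlt, hdvd⟩ := hmem
      have hC : (NB : Int) ∣ (n - la * NA) :=
        dvd_of_stride n NA NB hNA la0 la hC0 hdvd
      refine ⟨la, ?_, ?_⟩
      · rw [PySem.List.mem_pyRange_one]; omega
      · simp only [tB, Bool.and_eq_true, decide_eq_true_eq]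
        exact ⟨(PySem.Int.mod_eq_zero_iff_dvd _ _).mpr hC, htc⟩

-- ===== VERDICT (by name: the statement is the Claim_ definition above) =====
theorem patternMatching_spec : Claim_equal_patternMatching := by
  intro pattern value hdom hpre
  show patternMatching pattern value = patternMatching_alt pattern value
  simp only [patternMatching, patternMatching_alt]
  by_cases hA0 : ((pattern.toList.count 'a' : Nat) : Int) = 0
  · rw [if_pos hA0, if_pos hA0]
  · rw [if_neg hA0, if_neg hA0]
    by_cases hB0 : ((pattern.toList.count 'b' : Nat) : Int) = 0
    · rw [if_pos hB0, if_pos hB0]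
    · rw [if_neg hB0, if_neg hB0]
      set p := pattern.toList with hpdef
      set v := value.toList with hvdef
      have hNA0 : p.count 'a' ≠ 0 := fun h => hA0 (by rw [h]; rfl)
      have hNB0 : p.count 'b' ≠ 0 := fun h => hB0 (by rw [h]; rfl)
      have hpa : 'a' ∈ p := List.count_pos_iff.mp (Nat.pos_of_ne_zero hNA0)
      have hpb : 'b' ∈ p := List.count_pos_iff.mp (Nat.pos_of_ne_zero hNB0)
      rw [pgcd_eq_gcd]
      rw [PySem.Int.floordiv_natCast]
      rw [PySem.Int.floordiv_natCast]
      set K := v.length / p.count 'a' with hKdef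
      have hKN : K ≤ v.length := Nat.div_le_self _ _
      rw [PySem.List.pyRange_one_append 0 ((K : Int) + 1) ((v.length : Int) + 1)
            (by positivity) (by exact_mod_cast Int.add_le_add_right (Int.ofNat_le.mpr hKN) 1)]
      rw [loopA_breakfree v p _ _ _ _ _ ?hxs]
      case hxs =>
        intro la hla
        rw [PySem.List.mem_pyRange_one] at hla
        have h1 : la ≤ (K : Int) := by omega
        have h2 : la * (p.count 'a' : Int) ≤ (K : Int) * (p.count 'a' : Int) :=
          mul_le_mul_of_nonneg_right h1 (by positivity)
        have h3 : (K : Int) * (p.count 'a' : Int) ≤ (v.length : Int) := by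
          have := Nat.div_mul_le_self v.length (p.count 'a')
          exact_mod_cast this
        omega
      have htail : loopA v p (v.length : Int) (p.count 'a' : Int) (p.count 'b' : Int)
          (PySem.List.pyRange ((K : Int) + 1) ((v.length : Int) + 1) 1) = false := by
        rcases Nat.lt_or_ge K v.length with hlt | hge
        · rw [PySem.List.pyRange_one_cons (by omega : (K : Int) + 1 < (v.length : Int) + 1)]
          rw [loopA_cons, if_pos ?hbrk]
          case hbrk =>
            have h1 : p.count 'a' * K + v.length % p.count 'a' = v.length := by
              rw [hKdef]; exact Nat.div_add_mod _ _
            have h2 : v.length % p.count 'a' < p.count 'a' :=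
              Nat.mod_lt _ (Nat.pos_of_ne_zero hNA0)
            have h4 : (K + 1) * p.count 'a' = p.count 'a' * K + p.count 'a' := by ring
            have h5 : v.length < (K + 1) * p.count 'a' := by omega
            show ((v.length : Int)) < ((K : Int) + 1) * (p.count 'a' : Int)
            exact_mod_cast h5
        · rw [PySem.List.pyRange_one_eq_nil (by omega)]
          rfl
      rw [htail, Bool.or_false]
      have hcong : (PySem.List.pyRange 0 ((K : Int) + 1) 1).any
            (tA v p (v.length : Int) (p.count 'a' : Int) (p.count 'b' : Int))
          = (PySem.List.pyRange 0 ((K : Int) + 1) 1).any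
            (tB v p (v.length : Int) (p.count 'a' : Int) (p.count 'b' : Int)
              ((((PySem.List.index? p 'a').getD 0 : Nat)) : Int) (firstNotA p)) :=
        anyCongr _ _ _ (fun la hla => by
          rw [PySem.List.mem_pyRange_one] at hla
          exact tA_eq_tB v p hpa hpb la (by omega) (by omega))
      rw [hcong]
      rw [any_mod_stride v p (v.length : Int) (p.count 'a') (p.count 'b')
            (Nat.pos_of_ne_zero hNA0) (Nat.pos_of_ne_zero hNB0)
            (K : Int) _ _]
      cases hfind : findLa0 (v.length : Int) ((p.count 'a' : Nat) : Int) ((p.count 'b' : Nat) : Int)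
          (PySem.List.pyRange 0 (((p.count 'b') / Nat.gcd (p.count 'a') (p.count 'b') : Nat) : Int) 1) with
      | none => rfl
      | some la0 => simp only [loopB_eq_any]
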